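-- pv_equiv track=rewrite | github.com/Linc-tw/COVID_breakdown | COVID_breakdown_data_processing.py | itpFromCumul
-- ===== SOURCE A (Python) =====
-- def itpFromCumul(begin, end, length):
--   if length == 1:
--     return [end-begin]
--
--   q = (end - begin) // length
--   r = (end - begin) % length
--   list_ = [q] * length
--
--   for i in range(r):
--     list_[i] += 1
--
--   return list_
-- ===== SOURCE B (Python) =====
-- def itpFromCumul(begin, end, length):
--   out = []
--   rem = end - begin
--   while length > 0:
--     x = -((-rem) // length)   # ceiling of rem/length: largest remaining bucket first
--     out.append(x)
--     rem -= x
--     length -= 1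
--   return out
-- ===== Notes on version B (the rewrite author's own statement) =====
-- stated objective: alternative
-- what changed: Replaces the quotient/remainder split with fill-then-increment by a greedy single pass that keeps a running remaining total and repeatedly peels off the ceiling of remaining/buckets-left (-((-rem)//length)), shrinking the problem each step.
import Mathlib
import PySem

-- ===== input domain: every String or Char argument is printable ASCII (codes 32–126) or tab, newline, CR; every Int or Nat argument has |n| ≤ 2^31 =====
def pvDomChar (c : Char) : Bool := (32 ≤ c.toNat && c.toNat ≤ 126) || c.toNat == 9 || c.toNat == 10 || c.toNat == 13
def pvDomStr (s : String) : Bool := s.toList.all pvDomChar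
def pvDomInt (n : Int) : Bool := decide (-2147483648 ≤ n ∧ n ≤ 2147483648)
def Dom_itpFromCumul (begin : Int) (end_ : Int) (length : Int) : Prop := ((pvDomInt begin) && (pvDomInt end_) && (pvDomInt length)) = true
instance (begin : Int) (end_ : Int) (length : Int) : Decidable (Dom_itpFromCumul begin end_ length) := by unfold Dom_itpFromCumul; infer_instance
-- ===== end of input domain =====

-- B replaces A's quotient/remainder split by a greedy single pass: it keeps a running
-- remaining total and repeatedly peels off the ceiling of remaining/buckets (objective: alternative).


-- ===== PORT A =====
def itpFromCumul (begin : Int) (end_ : Int) (length : Int) : List Int :=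
  if length = 1 then [end_ - begin]
  else
    let q := PySem.Int.floordiv (end_ - begin) length
    let r := PySem.Int.mod (end_ - begin) length
    -- [q] * length: Python's list repetition yields [] for non-positive counts (toNat clamps likewise)
    let list0 := List.replicate length.toNat q
    -- for i in range(r): list_[i] += 1  (i is always ≥ 0 here, so i.toNat is exact)
    (PySem.List.pyRange 0 r 1).foldl (fun l i => l.set i.toNat (l.getD i.toNat 0 + 1)) list0

-- ===== PORT B =====
-- while length > 0: x = -((-rem) // length); out.append(x); rem -= x; length -= 1
def itpAltGo (rem : Int) (length : Int) : List Int :=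
  if h : 0 < length then
    let x := -(PySem.Int.floordiv (-rem) length)
    x :: itpAltGo (rem - x) (length - 1)
  else []
termination_by length.toNat
decreasing_by omega

def itpFromCumul_alt (begin : Int) (end_ : Int) (length : Int) : List Int :=
  itpAltGo (end_ - begin) length

-- ===== PRECONDITION & SPEC =====
-- Pre_: length ≠ 0 — at length = 0 A raises ZeroDivisionError ('//', '%').
def Pre_itpFromCumul (begin : Int) (end_ : Int) (length : Int) : Prop := length ≠ 0
instance (begin : Int) (end_ : Int) (length : Int) : Decidable (Pre_itpFromCumul begin end_ length) := by unfold Pre_itpFromCumul; infer_instance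
def pvWitness_itpFromCumul : Int × Int × Int := (3, 10, 4)

def Spec_itpFromCumul (begin : Int) (end_ : Int) (length : Int) (out : List Int) : Prop := out = itpFromCumul_alt begin end_ length
instance (begin : Int) (end_ : Int) (length : Int) (out : List Int) : Decidable (Spec_itpFromCumul begin end_ length out) := by unfold Spec_itpFromCumul; infer_instance

-- ===== CLAIM (what is proved, stated in full; the proofs are below) =====
def Claim_equal_itpFromCumul : Prop := ∀ (begin : Int) (end_ : Int) (length : Int), Dom_itpFromCumul begin end_ length → Pre_itpFromCumul begin end_ length → Spec_itpFromCumul begin end_ length (itpFromCumul begin end_ length)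

-- ===== LEMMAS AND PROOFS =====

-- Incrementing positions 0..k-1 of [q] * L turns it into [q+1] * k ++ [q] * (L-k).
lemma fold_inc (q : Int) (L : Nat) : ∀ (k : Nat), k ≤ L →
    (PySem.List.pyRange 0 (k : Int) 1).foldl
      (fun l i => l.set i.toNat (l.getD i.toNat 0 + 1)) (List.replicate L q)
    = List.replicate k (q + 1) ++ List.replicate (L - k) q := by
  intro k
  induction k with
  | zero => intro _; simp [PySem.List.pyRange_one_eq_nil]
  | succ k ih =>
    intro hk
    have hk' : k ≤ L := Nat.le_of_succ_le hk
    have hsplit : PySem.List.pyRange 0 ((k + 1 : Nat) : Int) 1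
        = PySem.List.pyRange 0 (k : Int) 1 ++ [(k : Int)] := by
      push_cast
      exact PySem.List.pyRange_one_succ_right (Int.natCast_nonneg k)
    rw [hsplit, List.foldl_append, ih hk']
    have hlt : k < L := hk
    have hLk : 0 < L - k := Nat.sub_pos_of_lt hlt
    simp only [List.foldl_cons, List.foldl_nil, Int.toNat_natCast]
    have hrep : List.replicate (L - k) q = q :: List.replicate (L - k - 1) q := by
      cases h : L - k with
      | zero => omega
      | succ m => simp [List.replicate_succ]
    rw [hrep]
    have hget : (List.replicate k (q + 1) ++ q :: List.replicate (L - k - 1) q).getD k 0 = q := by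
      rw [List.getD_eq_getElem?_getD, List.getElem?_append_right (by simp)]
      simp
    rw [hget]
    have hset : (List.replicate k (q + 1) ++ q :: List.replicate (L - k - 1) q).set k (q + 1)
        = List.replicate k (q + 1) ++ (q + 1) :: List.replicate (L - k - 1) q := by
      rw [List.set_append_right _ _ (by simp), List.length_replicate, Nat.sub_self, List.set_cons_zero]
    rw [hset]
    simp [List.replicate_succ', List.append_assoc, show L - (k + 1) = L - k - 1 by omega]

-- The ceiling step: with rem = n*q + r, 0 <= r < n, the first bucket is q (r = 0) or q+1.
lemma ceil_step_exact (rem n q : Int) (hn : 0 < n) (hqr : n * q = rem) :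
    -(PySem.Int.floordiv (-rem) n) = q := by
  rw [PySem.Int.neg_floordiv_neg_eq_iff_of_pos hn]
  constructor <;> nlinarith

lemma ceil_step_up (rem n q r : Int) (hn : 0 < n) (hqr : n * q + r = rem)
    (hr0 : 0 < r) (hrn : r < n) :
    -(PySem.Int.floordiv (-rem) n) = q + 1 := by
  rw [PySem.Int.neg_floordiv_neg_eq_iff_of_pos hn]
  constructor <;> nlinarith

-- B's loop peels buckets one at a time; with rem = (k+1)*q + r it yields the
-- front-loaded distribution [q+1] * r ++ [q] * (k+1-r).
lemma go_split : ∀ (k : Nat) (rem q r : Int), ((k : Int) + 1) * q + r = rem → 0 ≤ r → r < (k : Int) + 1 →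
    itpAltGo rem ((k : Int) + 1)
      = List.replicate r.toNat (q + 1) ++ List.replicate ((k + 1) - r.toNat) q := by
  intro k
  induction k with
  | zero =>
    intro rem q r hqr hr0 hrn
    have hr : r = 0 := by omega
    subst hr
    have hx : -(PySem.Int.floordiv (-rem) ((0 : Int) + 1)) = q :=
      ceil_step_exact rem _ q (by norm_num) (by push_cast at hqr ⊢; linarith)
    rw [itpAltGo, dif_pos (by norm_num)]
    simp only [hx]
    rw [itpAltGo, dif_neg (by norm_num)]
    norm_num
    push_cast at hqr
    linarith
  | succ k ih =>
    intro rem q r hqr hr0 hrn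
    have hn : (0 : Int) < ((k + 1 : Nat) : Int) + 1 := by positivity
    by_cases hr : r = 0
    · subst hr
      have hx : -(PySem.Int.floordiv (-rem) (((k + 1 : Nat) : Int) + 1)) = q :=
        ceil_step_exact rem _ q hn (by push_cast at hqr ⊢; linarith)
      rw [itpAltGo, dif_pos hn]
      simp only [hx]
      have harg : ((k + 1 : Nat) : Int) + 1 - 1 = ((k : Nat) : Int) + 1 := by push_cast; ring
      rw [harg, ih (rem - q) q 0 (by push_cast at hqr ⊢; linarith) le_rfl (by positivity)]
      simp [List.replicate_succ]
    · have hr1 : 0 < r := lt_of_le_of_ne hr0 (Ne.symm hr)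
      have hx : -(PySem.Int.floordiv (-rem) (((k + 1 : Nat) : Int) + 1)) = q + 1 :=
        ceil_step_up rem _ q r hn hqr hr1 hrn
      rw [itpAltGo, dif_pos hn]
      simp only [hx]
      have harg : ((k + 1 : Nat) : Int) + 1 - 1 = ((k : Nat) : Int) + 1 := by push_cast; ring
      rw [harg, ih (rem - (q + 1)) q (r - 1) (by push_cast at hqr ⊢; linarith) (by omega) (by push_cast at hrn ⊢; linarith)]
      have h1 : r.toNat = (r - 1).toNat + 1 := by omega
      rw [h1, List.replicate_succ]
      simp

-- ===== VERDICT (by name: the statement is the Claim_ definition above) =====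
theorem itpFromCumul_spec : Claim_equal_itpFromCumul := by
  intro b e L _ hL
  unfold Spec_itpFromCumul itpFromCumul itpFromCumul_alt
  rcases lt_or_gt_of_ne hL with hneg | hpos
  · -- length < 0: A's range is empty and its base list is []; B's loop never runs
    rw [itpAltGo, dif_neg (by omega)]
    simp only [if_neg (show ¬ L = 1 by omega)]
    have hb := PySem.Int.mod_neg_bounds (e - b) hneg
    rw [PySem.List.pyRange_one_eq_nil (by omega)]
    simp only [List.foldl_nil]
    simp [show L.toNat = 0 by omega]
  · -- length ≥ 1: both sides equal [q+1] * r ++ [q] * (L - r)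
    set q := PySem.Int.floordiv (e - b) L with hq
    set r := PySem.Int.mod (e - b) L with hrr
    have hr0 : 0 ≤ r := PySem.Int.mod_nonneg (e - b) hpos
    have hrL : r < L := PySem.Int.mod_lt (e - b) hpos
    have hqr : L * q + r = e - b := by
      have h := PySem.Int.floordiv_mul_add_mod (e - b) L
      rw [← hq, ← hrr] at h
      linarith [mul_comm q L]
    have hk : ((L.toNat - 1 : Nat) : Int) + 1 = L := by omega
    have hB : itpAltGo (e - b) L
        = List.replicate r.toNat (q + 1) ++ List.replicate ((L.toNat - 1) + 1 - r.toNat) q := by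
      rw [← hk]
      exact go_split (L.toNat - 1) (e - b) q r (by rw [hk]; exact hqr) hr0 (by rw [hk]; exact hrL)
    rw [hB, show (L.toNat - 1) + 1 - r.toNat = L.toNat - r.toNat by omega]
    by_cases h1 : L = 1
    · subst h1
      have hq1 : q = e - b := by
        rw [hq, PySem.Int.floordiv_eq_ediv_of_pos (by norm_num)]; simp
      have hr1 : r = 0 := by
        rw [hrr, PySem.Int.mod_eq_emod_of_pos (by norm_num)]; simp
      simp [hq1, hr1]
    · simp only [if_neg h1]
      have hcast : (r.toNat : Int) = r := Int.toNat_of_nonneg hr0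
      have hkk : r.toNat ≤ L.toNat := by omega
      calc (PySem.List.pyRange 0 r 1).foldl
            (fun l i => l.set i.toNat (l.getD i.toNat 0 + 1)) (List.replicate L.toNat q)
          = (PySem.List.pyRange 0 (r.toNat : Int) 1).foldl
            (fun l i => l.set i.toNat (l.getD i.toNat 0 + 1)) (List.replicate L.toNat q) := by
            rw [hcast]
        _ = List.replicate r.toNat (q + 1) ++ List.replicate (L.toNat - r.toNat) q :=
            fold_inc q L.toNat r.toNat hkk
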